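-- pv_equiv track=rewrite | github.com/AleshaVampire7/pdf_parser | src/extractors/text_extractor/key_value_extractor.py | parse_key_value_from_text
-- ===== SOURCE A (Python) =====
-- def parse_key_value_from_text(text, keyName):
--    lines = text.split("\n")
--    key = keyName.strip().strip(":")
--    value = []
--
--    found_search_phrase = False
--
--    for line in lines:
--        if line.startswith(keyName):
--            found_search_phrase = True
--            value.append(line[len(keyName):].strip())
--        elif found_search_phrase:
--            if ":" in line:
--                break
--            value.append(line.strip())
--
--    if found_search_phrase:
--        return key, "\n".join(value).strip()
--    else:
--        return None
-- ===== SOURCE B (Python) =====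
-- def parse_key_value_from_text(text, keyName):
--     # Reverse single pass: fold over the lines back-to-front keeping two
--     # accumulators: `cont` = the lines an in-progress scan would still collect
--     # starting at this suffix, `found` = the collected block starting at the
--     # first key line of this suffix (None if the suffix has no key line).
--     found = None
--     cont = []
--     for line in reversed(text.split("\n")):
--         if line.startswith(keyName):
--             cont = [line[len(keyName):].strip()] + cont
--             found = cont
--         elif ":" in line:
--             cont = []
--         else:
--             cont = [line.strip()] + cont
--     if found is None:
--         return None
--     return keyName.strip().strip(":"), "\n".join(found).strip()
-- ===== Notes on version B (the rewrite author's own statement) =====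
-- stated objective: alternative
-- what changed: Replaces A's forward flag-driven scan with break by a single reverse pass (a right fold over the lines) that builds the value back-to-front with two accumulators: the block an in-progress scan would still collect from this suffix, and the block starting at the suffix's first key line; no flag and no break.
import Mathlib
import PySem

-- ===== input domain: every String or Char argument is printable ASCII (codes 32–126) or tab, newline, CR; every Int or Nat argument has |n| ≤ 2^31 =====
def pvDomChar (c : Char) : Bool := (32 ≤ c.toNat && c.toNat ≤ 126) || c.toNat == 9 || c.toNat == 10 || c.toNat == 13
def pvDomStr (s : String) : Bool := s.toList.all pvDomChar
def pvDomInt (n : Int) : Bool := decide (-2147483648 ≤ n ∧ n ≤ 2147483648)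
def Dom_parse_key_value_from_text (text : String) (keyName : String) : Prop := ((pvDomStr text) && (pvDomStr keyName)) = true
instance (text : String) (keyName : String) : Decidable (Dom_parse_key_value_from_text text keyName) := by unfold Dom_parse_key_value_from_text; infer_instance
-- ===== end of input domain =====

-- B replaces A's forward flag-driven scan (with break) by a reverse pass / right fold with two accumulators, building the value back-to-front (objective: alternative; same O(n) cost).


-- ===== PORT A =====
-- A: one forward pass over the lines with a mutable found flag; break = stop the recursion.
def pvA_loop (keyName : String) : List String → Bool → List String → Bool × List String
  | [], found, value => (found, value)
  | line :: rest, found, value =>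
    if PySem.Str.startswith line keyName then
      pvA_loop keyName rest true
        (value ++ [PySem.Str.strip (PySem.Str.slice line (some (PySem.Str.len keyName)) none)])
    else if found then
      if PySem.Str.isIn ":" line then (found, value)   -- break
      else pvA_loop keyName rest found (value ++ [PySem.Str.strip line])
    else pvA_loop keyName rest found value

def parse_key_value_from_text (text : String) (keyName : String) : Option (String × String) :=
  let lines := (PySem.Str.split? text "\n").getD []   -- sep "\n" ≠ "", so split? is always some
  let key := PySem.Str.stripChars (PySem.Str.strip keyName) ":"
  let r := pvA_loop keyName lines false []
  if r.1 then some (key, PySem.Str.strip (PySem.Str.join "\n" r.2)) else none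

-- ===== PORT B =====
-- B: reverse pass (right fold). State (found, cont): cont = lines an in-progress scan
-- would still collect from this suffix; found = block starting at the suffix's first key line.
def pvB_step (keyName : String) (line : String) (st : Option (List String) × List String) :
    Option (List String) × List String :=
  if PySem.Str.startswith line keyName then
    let c := PySem.Str.strip (PySem.Str.slice line (some (PySem.Str.len keyName)) none) :: st.2
    (some c, c)
  else if PySem.Str.isIn ":" line then (st.1, [])
  else (st.1, PySem.Str.strip line :: st.2)

def parse_key_value_from_text_alt (text : String) (keyName : String) : Option (String × String) :=
  let lines := (PySem.Str.split? text "\n").getD []   -- sep "\n" ≠ "", so split? is always some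
  match (lines.foldr (pvB_step keyName) (none, [])).1 with
  | none => none
  | some v => some (PySem.Str.stripChars (PySem.Str.strip keyName) ":",
                    PySem.Str.strip (PySem.Str.join "\n" v))

-- ===== PRECONDITION & SPEC =====
def Spec_parse_key_value_from_text (text : String) (keyName : String) (out : Option (String × String)) : Prop := out = parse_key_value_from_text_alt text keyName
instance (text : String) (keyName : String) (out : Option (String × String)) : Decidable (Spec_parse_key_value_from_text text keyName out) := by unfold Spec_parse_key_value_from_text; infer_instance

-- ===== CLAIM (what is proved, stated in full; the proofs are below) =====
def Claim_equal_parse_key_value_from_text : Prop := ∀ (text : String) (keyName : String), Dom_parse_key_value_from_text text keyName → Spec_parse_key_value_from_text text keyName (parse_key_value_from_text text keyName)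

-- ===== LEMMAS AND PROOFS =====

-- Specification helpers for the proof (used by no port): what the fold's two components mean.
def pvCollect (keyName : String) : List String → List String
  | [] => []
  | ln :: rest =>
    if PySem.Str.startswith ln keyName then
      PySem.Str.strip (PySem.Str.slice ln (some (PySem.Str.len keyName)) none) :: pvCollect keyName rest
    else if PySem.Str.isIn ":" ln then []
    else PySem.Str.strip ln :: pvCollect keyName rest

def pvFound (keyName : String) : List String → Option (List String)
  | [] => none
  | ln :: rest =>
    if PySem.Str.startswith ln keyName then some (pvCollect keyName (ln :: rest))
    else pvFound keyName rest

-- The right fold computes exactly (pvFound, pvCollect).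
theorem pvB_fold_eq (keyName : String) (ls : List String) :
    ls.foldr (pvB_step keyName) (none, []) = (pvFound keyName ls, pvCollect keyName ls) := by
  induction ls with
  | nil => rfl
  | cons ln rest ih =>
    simp only [List.foldr_cons, ih, pvB_step, pvFound, pvCollect]
    split_ifs <;> rfl

-- Once the flag is set, A's loop appends exactly pvCollect.
theorem pvA_loop_true (keyName : String) (ls : List String) (acc : List String) :
    pvA_loop keyName ls true acc = (true, acc ++ pvCollect keyName ls) := by
  induction ls generalizing acc with
  | nil => simp [pvA_loop, pvCollect]
  | cons ln rest ih =>
    simp only [pvA_loop, pvCollect]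
    split_ifs with h1 h2
    · rw [ih]; simp
    · simp
    · rw [ih]; simp

-- A's loop with the flag unset, characterised by pvFound.
theorem pvA_loop_false (keyName : String) (ls : List String) (acc : List String) :
    pvA_loop keyName ls false acc =
      match pvFound keyName ls with
      | none => (false, acc)
      | some v => (true, acc ++ v) := by
  induction ls generalizing acc with
  | nil => simp [pvA_loop, pvFound]
  | cons ln rest ih =>
    simp only [pvA_loop, pvFound, Bool.false_eq_true, if_false]
    split_ifs with h1
    · rw [pvA_loop_true]
      rw [PySem.Str.startswith_eq] at h1
      simp [pvCollect, h1]
    · exact ih acc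

-- ===== VERDICT (by name: the statement is the Claim_ definition above) =====
theorem parse_key_value_from_text_spec : Claim_equal_parse_key_value_from_text := by
  intro text keyName _
  unfold Spec_parse_key_value_from_text parse_key_value_from_text parse_key_value_from_text_alt
  simp only [pvB_fold_eq, pvA_loop_false]
  cases h : pvFound keyName ((PySem.Str.split? text "\n").getD []) with
  | none => simp
  | some v => simp
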